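-- pv_equiv track=rewrite | github.com/lmarte17/athena | backend/adk-bidi/app/orchestrator/conversation_orchestrator.py | _is_confirmation_acceptance
-- ===== SOURCE A (Python) =====
-- def _is_confirmation_acceptance(text: str) -> bool:
--     if not text:
--         return False
--     accepted_phrases = (
--         "yes",
--         "yes please",
--         "yeah",
--         "yep",
--         "sure",
--         "sure please",
--         "go ahead",
--         "do it",
--         "do that",
--         "send it",
--         "send that",
--         "confirm",
--         "approved",
--         "sounds good",
--         "ok do it",
--         "okay do it",
--         "please do",
--     )
--     return any(text == phrase or text.startswith(f"{phrase} ") for phrase in accepted_phrases)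
-- ===== SOURCE B (Python) =====
-- _ACCEPTED = frozenset((
--     "yes", "yes please", "yeah", "yep", "sure", "sure please",
--     "go ahead", "do it", "do that", "send it", "send that",
--     "confirm", "approved", "sounds good", "ok do it", "okay do it",
--     "please do",
-- ))
--
--
-- def _is_confirmation_acceptance(text: str) -> bool:
--     if not text:
--         return False
--     if text in _ACCEPTED:
--         return True
--     for i, ch in enumerate(text):
--         if ch == ' ' and text[:i] in _ACCEPTED:
--             return True
--     return False
-- ===== Notes on version B (the rewrite author's own statement) =====
-- stated objective: alternative
-- what changed: B iterates over the space positions of the input and tests each prefix against a frozenset of the phrases, instead of scanning the phrase tuple with == / startswith for each phrase.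
import Mathlib
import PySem

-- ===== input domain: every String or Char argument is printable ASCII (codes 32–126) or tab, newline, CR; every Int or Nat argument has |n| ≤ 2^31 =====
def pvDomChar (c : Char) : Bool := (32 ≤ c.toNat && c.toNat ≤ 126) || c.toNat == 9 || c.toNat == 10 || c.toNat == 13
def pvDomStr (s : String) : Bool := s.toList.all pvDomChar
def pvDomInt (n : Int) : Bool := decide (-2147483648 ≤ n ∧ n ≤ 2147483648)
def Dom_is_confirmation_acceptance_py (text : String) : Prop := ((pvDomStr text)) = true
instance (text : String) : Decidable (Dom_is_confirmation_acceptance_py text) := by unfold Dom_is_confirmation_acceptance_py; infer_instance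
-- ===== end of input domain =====

-- B tests prefixes of the input at its space positions against a set of phrases,
-- instead of A's scan of the phrase tuple with ==/startswith; objective: alternative.

-- the accepted phrases, shared data of both ports
def pvPhrases : List (List Char) :=
  ["yes".toList, "yes please".toList, "yeah".toList, "yep".toList, "sure".toList,
   "sure please".toList, "go ahead".toList, "do it".toList, "do that".toList,
   "send it".toList, "send that".toList, "confirm".toList, "approved".toList,
   "sounds good".toList, "ok do it".toList, "okay do it".toList, "please do".toList]

-- ===== PORT A =====
def is_confirmation_acceptance_py (text : String) : Bool :=
  let t := text.toList
  if t = [] then false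
  else pvPhrases.any (fun p => t == p || PySem.Chars.startswith t (p ++ [' ']))

-- ===== PORT B =====
def pvAcceptedSet : PySem.Set (List Char) := PySem.Set.ofList pvPhrases

def is_confirmation_acceptance_py_alt (text : String) : Bool :=
  let t := text.toList
  if t = [] then false
  else if PySem.Set.contains pvAcceptedSet t then true
  else
    -- enumerate indices are ≥ 0, so text[:i] is exactly t.take i
    (PySem.List.enumerate t 0).any (fun q => q.2 == ' ' && PySem.Set.contains pvAcceptedSet (t.take q.1.toNat))

-- ===== PRECONDITION & SPEC =====
def Spec_is_confirmation_acceptance_py (text : String) (out : Bool) : Prop := out = is_confirmation_acceptance_py_alt text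
instance (text : String) (out : Bool) : Decidable (Spec_is_confirmation_acceptance_py text out) := by unfold Spec_is_confirmation_acceptance_py; infer_instance

-- ===== CLAIM (what is proved, stated in full; the proofs are below) =====
def Claim_equal_is_confirmation_acceptance_py : Prop := ∀ (text : String), Dom_is_confirmation_acceptance_py text → Spec_is_confirmation_acceptance_py text (is_confirmation_acceptance_py text)

-- ===== LEMMAS AND PROOFS =====

-- A's per-phrase test holds for some phrase iff B's prefix-at-a-space scan (or the
-- whole-string membership) hits: the index k of B's scan corresponds to p.length on A's side.
theorem pv_exists_iff (t : List Char) :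
    (∃ p ∈ pvPhrases, t = p ∨ (p ++ [' ']) <+: t) ↔
      t ∈ pvPhrases ∨ ∃ k, ∃ _ : k < t.length, t[k] = ' ' ∧ t.take k ∈ pvPhrases := by
  constructor
  · rintro ⟨p, hp, (rfl | hpre)⟩
    · exact Or.inl hp
    · refine Or.inr ⟨p.length, ?_, ?_, ?_⟩
      · have := hpre.length_le; simp at this; omega
      · have h2 := hpre.getElem (i := p.length) (by simp)
        exact h2.symm.trans (by simp)
      · have : p <+: t := (List.prefix_append p [' ']).trans hpre
        rw [List.prefix_iff_eq_take] at this
        exact this ▸ hp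
  · rintro (ht | ⟨k, hk, hsp, hmem⟩)
    · exact ⟨t, ht, Or.inl rfl⟩
    · refine ⟨t.take k, hmem, Or.inr ?_⟩
      have : t.take k ++ [' '] = t.take (k + 1) := by
        rw [List.take_add_one, List.getElem?_eq_getElem hk, hsp]; rfl
      rw [this]
      exact List.take_prefix _ _

-- ===== VERDICT (by name: the statement is the Claim_ definition above) =====
theorem is_confirmation_acceptance_py_spec : Claim_equal_is_confirmation_acceptance_py := by
  intro text _
  unfold Spec_is_confirmation_acceptance_py is_confirmation_acceptance_py is_confirmation_acceptance_py_alt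
  set t := text.toList with ht
  by_cases h : t = []
  · simp [h]
  · simp only [h, if_false]
    rw [Bool.eq_iff_iff]
    have hmem : ∀ x : List Char, PySem.Set.contains pvAcceptedSet x = true ↔ x ∈ pvPhrases := by
      intro x
      rw [PySem.Set.contains_iff]
      unfold pvAcceptedSet
      exact PySem.Set.mem_ofList pvPhrases x
    simp only [List.any_eq_true, Bool.or_eq_true, Bool.and_eq_true, beq_iff_eq,
      PySem.Chars.startswith_iff, Bool.if_true_left, Bool.or_eq_true, decide_eq_true_eq,
      PySem.List.mem_enumerate_iff, hmem]
    rw [show (∃ p ∈ pvPhrases, t = p ∨ (p ++ [' ']) <+: t) ↔ _ from pv_exists_iff t]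
    constructor
    · rintro (ht' | ⟨k, hk, hsp, hmem'⟩)
      · exact Or.inl ht'
      · exact Or.inr ⟨(((0 : Int) + k), t[k]), ⟨k, hk, rfl⟩, by simpa using hsp, by simpa using hmem'⟩
    · rintro (ht' | ⟨q, ⟨k, hk, rfl⟩, hsp, hmem'⟩)
      · exact Or.inl ht'
      · exact Or.inr ⟨k, hk, by simpa using hsp, by simpa using hmem'⟩
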